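-- pv_equiv track=rewrite | github.com/Hoonst/algorithm | Samsung_Special/21608_primary_shark.py | point_function
-- ===== SOURCE A (Python) =====
-- dx = [1,-1,0,0]
--
-- dy = [0,0,1,-1]
--
-- def point_function(student_info, graph):
--     N = len(graph)
--
--     points = {0:0, 1:1, 2:10, 3:100, 4:1000}
--     total_point = 0
--     for row_idx in range(N):
--         for col_idx in range(N):
--             point = 0
--             favorites = student_info[graph[row_idx][col_idx]]
--             for i in range(4):
--                 moved_x = row_idx + dx[i]
--                 moved_y = col_idx + dy[i]
--
--                 if 0 <= moved_x < N and 0 <= moved_y < N: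
--                     if graph[moved_x][moved_y] in favorites:
--                         point += 1
--             total_point += points[point]
--
--     return total_point
-- ===== SOURCE B (Python) =====
-- POINTS = [0, 1, 10, 100, 1000]
--
-- def point_function(student_info, graph):
--     n = len(graph)
--     counts = [0] * (n * n)
--     for r in range(n):
--         for c in range(n - 1):
--             a = graph[r][c]
--             b = graph[r][c + 1]
--             if b in student_info[a]:
--                 counts[r * n + c] += 1
--             if a in student_info[b]:
--                 counts[r * n + c + 1] += 1
--     for r in range(n - 1):
--         for c in range(n):
--             a = graph[r][c]
--             b = graph[r + 1][c]
--             if b in student_info[a]: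
--                 counts[r * n + c] += 1
--             if a in student_info[b]:
--                 counts[(r + 1) * n + c] += 1
--     return sum(POINTS[k] for k in counts)
-- ===== Notes on version B (the rewrite author's own statement) =====
-- stated objective: alternative
-- what changed: Replaces A's per-cell scan of the 4 neighbour directions with a single pass over the grid's adjacent (horizontal and vertical) pairs that conditionally bumps a flat N*N count table at both endpoints, followed by a separate scoring pass over the table.
import Mathlib
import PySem

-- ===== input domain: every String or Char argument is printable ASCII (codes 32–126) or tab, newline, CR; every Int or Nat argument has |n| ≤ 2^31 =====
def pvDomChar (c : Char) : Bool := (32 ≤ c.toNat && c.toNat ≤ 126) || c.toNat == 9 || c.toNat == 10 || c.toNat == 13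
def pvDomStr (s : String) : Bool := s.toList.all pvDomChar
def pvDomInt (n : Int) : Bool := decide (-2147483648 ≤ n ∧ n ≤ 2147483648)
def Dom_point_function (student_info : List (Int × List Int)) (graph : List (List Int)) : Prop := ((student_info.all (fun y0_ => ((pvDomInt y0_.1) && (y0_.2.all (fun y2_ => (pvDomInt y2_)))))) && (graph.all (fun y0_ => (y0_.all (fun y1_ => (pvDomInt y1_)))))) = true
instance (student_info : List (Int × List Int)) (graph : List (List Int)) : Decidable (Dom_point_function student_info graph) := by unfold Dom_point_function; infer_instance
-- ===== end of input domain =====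

-- B replaces A's per-cell 4-direction neighbour scan by a single pass over the grid's
-- adjacent pairs that fills a flat count table, plus a separate scoring pass (objective:
-- alternative decomposition, same asymptotic cost).

-- ===== PORT A =====
def pfDx : List Int := [1, -1, 0, 0]
def pfDy : List Int := [0, 0, 1, -1]
-- graph[r][c] for Nat indices known in range (Pre_ keeps them in range)
def pfCell (graph : List (List Int)) (r c : Nat) : Int := (graph.getD r []).getD c 0
-- graph[x][y] for Int indices (A only evaluates it under its 0 ≤ x < N bound checks)
def pfCellI (graph : List (List Int)) (r c : Int) : Int :=
  PySem.List.pyGetD (PySem.List.pyGetD graph r []) c 0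
-- student_info[v]: first-match association-list lookup (Pre_ requires the key to exist)
def pfFav (si : List (Int × List Int)) (v : Int) : List Int := (si.lookup v).getD []
-- the dict {0:0, 1:1, 2:10, 3:100, 4:1000}
def pfPointsDict : List (Int × Int) := [(0, 0), (1, 1), (2, 10), (3, 100), (4, 1000)]

def point_function (student_info : List (Int × List Int)) (graph : List (List Int)) : Int :=
  let N : Int := graph.length
  (List.range graph.length).foldl (fun total_point row_idx =>
    (List.range graph.length).foldl (fun total_point col_idx =>
      let favorites := pfFav student_info (pfCell graph row_idx col_idx)
      let point : Int :=
        (List.range 4).foldl (fun point i =>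
          let moved_x : Int := (row_idx : Int) + pfDx.getD i 0
          let moved_y : Int := (col_idx : Int) + pfDy.getD i 0
          if 0 ≤ moved_x ∧ moved_x < N ∧ 0 ≤ moved_y ∧ moved_y < N then
            if favorites.contains (pfCellI graph moved_x moved_y) then point + 1 else point
          else point) 0
      total_point + (pfPointsDict.lookup point).getD 0) total_point) 0

-- ===== PORT B =====
def pfPoints : List Int := [0, 1, 10, 100, 1000]
-- counts[i] += 1
def pfBump (cs : List Int) (i : Nat) : List Int := cs.set i (cs.getD i 0 + 1)

def point_function_alt (student_info : List (Int × List Int)) (graph : List (List Int)) : Int :=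
  let n := graph.length
  let counts0 : List Int := List.replicate (n * n) 0
  let counts1 := (List.range n).foldl (fun cs r =>
    (List.range (n - 1)).foldl (fun cs c =>
      let a := pfCell graph r c
      let b := pfCell graph r (c + 1)
      let cs1 := if (pfFav student_info a).contains b then pfBump cs (r * n + c) else cs
      if (pfFav student_info b).contains a then pfBump cs1 (r * n + c + 1) else cs1) cs) counts0
  let counts2 := (List.range (n - 1)).foldl (fun cs r =>
    (List.range n).foldl (fun cs c =>
      let a := pfCell graph r c
      let b := pfCell graph (r + 1) c
      let cs1 := if (pfFav student_info a).contains b then pfBump cs (r * n + c) else cs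
      if (pfFav student_info b).contains a then pfBump cs1 ((r + 1) * n + c) else cs1) cs) counts1
  counts2.foldl (fun total k => total + PySem.List.pyGetD pfPoints k 0) 0

-- ===== PRECONDITION & SPEC =====
-- Pre_ excludes exactly the inputs where Python A raises: a row of the N×N window shorter
-- than N (IndexError) or a cell id that is not a key of student_info (KeyError).
def Pre_point_function (student_info : List (Int × List Int)) (graph : List (List Int)) : Prop :=
  (∀ row ∈ graph, graph.length ≤ row.length) ∧
  (∀ r ∈ List.range graph.length, ∀ c ∈ List.range graph.length,
    (student_info.lookup (pfCell graph r c)).isSome = true)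
instance (student_info : List (Int × List Int)) (graph : List (List Int)) : Decidable (Pre_point_function student_info graph) := by unfold Pre_point_function; infer_instance

def pvWitness_point_function : (List (Int × List Int)) × List (List Int) :=
  ([(0, [1]), (1, [0, 1])], [[0, 1], [1, 0]])

def Spec_point_function (student_info : List (Int × List Int)) (graph : List (List Int)) (out : Int) : Prop := out = point_function_alt student_info graph
instance (student_info : List (Int × List Int)) (graph : List (List Int)) (out : Int) : Decidable (Spec_point_function student_info graph out) := by unfold Spec_point_function; infer_instance

-- ===== CLAIM (what is proved, stated in full; the proofs are below) =====
def Claim_equal_point_function : Prop := ∀ (student_info : List (Int × List Int)) (graph : List (List Int)), Dom_point_function student_info graph → Pre_point_function student_info graph → Spec_point_function student_info graph (point_function student_info graph)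

-- ===== LEMMAS AND PROOFS =====

-- cell (r,c) likes cell (r',c')
def pfLikes (si : List (Int × List Int)) (graph : List (List Int)) (r c r' c' : Nat) : Bool :=
  (pfFav si (pfCell graph r c)).contains (pfCell graph r' c')

-- the number of neighbours of (r,c) that (r,c) likes, as four indicators
-- (order: right, left, down, up — the order the count table is characterised in)
def pfCnt (si : List (Int × List Int)) (graph : List (List Int)) (n r c : Nat) : Nat :=
  (if c + 1 < n ∧ pfLikes si graph r c r (c + 1) = true then 1 else 0)
  + (if 0 < c ∧ pfLikes si graph r c r (c - 1) = true then 1 else 0)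
  + (if r + 1 < n ∧ pfLikes si graph r c (r + 1) c = true then 1 else 0)
  + (if 0 < r ∧ pfLikes si graph r c (r - 1) c = true then 1 else 0)

-- the bump targets of B's horizontal pass, resp. vertical pass
def pfOpsH (si : List (Int × List Int)) (graph : List (List Int)) (n : Nat) : List Nat :=
  (List.range n).flatMap (fun r => (List.range (n - 1)).flatMap (fun c =>
    (if pfLikes si graph r c r (c + 1) then [r * n + c] else [])
    ++ (if pfLikes si graph r (c + 1) r c then [r * n + c + 1] else [])))
def pfOpsV (si : List (Int × List Int)) (graph : List (List Int)) (n : Nat) : List Nat :=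
  (List.range (n - 1)).flatMap (fun r => (List.range n).flatMap (fun c =>
    (if pfLikes si graph r c (r + 1) c then [r * n + c] else [])
    ++ (if pfLikes si graph (r + 1) c r c then [(r + 1) * n + c] else [])))

lemma pfCnt_le_four (si : List (Int × List Int)) (graph : List (List Int)) (n r c : Nat) :
    pfCnt si graph n r c ≤ 4 := by
  unfold pfCnt; split_ifs <;> omega

lemma pf_pts_eq (k : Nat) (h : k ≤ 4) :
    (pfPointsDict.lookup (k : Int)).getD 0 = PySem.List.pyGetD pfPoints (k : Int) 0 := by
  interval_cases k <;> decide

-- getD after a set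
lemma pf_getD_set (l : List Int) (i j : Nat) (v : Int) :
    (l.set i v).getD j 0 = if i = j ∧ i < l.length then v else l.getD j 0 := by
  simp only [List.getD_eq_getElem?_getD, List.getElem?_set]
  split_ifs with h1 h2 h3 <;> simp_all
  omega

lemma pf_foldl_bump_length (ops : List Nat) (cs : List Int) :
    (ops.foldl pfBump cs).length = cs.length := by
  induction ops generalizing cs with
  | nil => rfl
  | cons x t ih => simp [List.foldl_cons, ih, pfBump]

lemma pf_foldl_bump_getD (ops : List Nat) (cs : List Int)
    (hb : ∀ i ∈ ops, i < cs.length) (j : Nat) :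
    (ops.foldl pfBump cs).getD j 0 = cs.getD j 0 + (ops.count j : Int) := by
  induction ops generalizing cs with
  | nil => simp
  | cons x t ih =>
    have hx : x < cs.length := hb x (by simp)
    have ht : ∀ i ∈ t, i < (pfBump cs x).length := by
      intro i hi; simpa [pfBump] using hb i (by simp [hi])
    rw [List.foldl_cons, ih (pfBump cs x) ht]
    rw [pfBump, pf_getD_set]
    have hcc : (x :: t).count j = t.count j + (if x = j then 1 else 0) := by
      simp [List.count_cons]
    rw [hcc]
    by_cases h : x = j
    · subst h
      rw [if_pos ⟨rfl, hx⟩, if_pos rfl]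
      push_cast; omega
    · rw [if_neg (by tauto), if_neg h]
      push_cast; omega

lemma pf_count_flatMap {α : Type} [DecidableEq α] (l : List α) (g : α → List Nat) (a : Nat) :
    ((l.flatMap g).count a) = (l.map (fun x => (g x).count a)).sum := by
  induction l with
  | nil => simp
  | cons x t ih => simp [List.count_append, ih]

lemma pf_sum_map_range_zero (m : Nat) (f : Nat → Nat) :
    (∀ i, i < m → f i = 0) → ((List.range m).map f).sum = 0 := by
  induction m with
  | zero => simp
  | succ m ih =>
    intro h0
    rw [List.range_succ, List.map_append, List.sum_append]
    simp [ih (fun i hi => h0 i (by omega)), h0 m (by omega)]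

lemma pf_sum_map_range_single (m t : Nat) (f : Nat → Nat) :
    t < m → (∀ i, i < m → i ≠ t → f i = 0) →
    ((List.range m).map f).sum = f t := by
  induction m with
  | zero => omega
  | succ m ih =>
    intro ht h0
    rw [List.range_succ, List.map_append, List.sum_append]
    by_cases hm : t = m
    · subst hm
      rw [pf_sum_map_range_zero t f (fun i hi => h0 i (by omega) (by omega))]
      simp
    · rw [ih (by omega) (fun i hi hne => h0 i (by omega) hne)]
      simp [h0 m (by omega) (fun h => hm h.symm)]

lemma pf_count_single (b : Bool) (x j : Nat) :
    ((if b then [x] else []) : List Nat).count j = if b = true ∧ x = j then 1 else 0 := by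
  cases b <;> simp [List.count_singleton]

lemma pf_enc_inj {n r c r0 c0 : Nat} (hc : c < n) (hc0 : c0 < n) :
    r * n + c = r0 * n + c0 ↔ (r = r0 ∧ c = c0) := by
  constructor
  · intro h
    have hr : r = r0 := by nlinarith
    subst hr; omega
  · rintro ⟨rfl, rfl⟩; rfl

lemma pf_enc_lt {n r c : Nat} (hr : r < n) (hc : c < n) : r * n + c < n * n := by
  nlinarith

lemma pf_sum_range_mul (a b : Nat) (g : Nat → Int) :
    ((List.range (a * b)).map g).sum
      = ((List.range a).map (fun r => ((List.range b).map (fun c => g (r * b + c))).sum)).sum := by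
  induction a with
  | zero => simp
  | succ a ih =>
    rw [Nat.succ_mul, List.range_add, List.map_append, List.sum_append, ih,
        List.range_succ, List.map_append, List.sum_append]
    simp [Function.comp_def]

lemma pf_map_eq_map_range (l : List Int) (f : Int → Int) :
    l.map f = (List.range l.length).map (fun j => f (l.getD j 0)) := by
  induction l with
  | nil => simp
  | cons x xs ih => simp [List.range_succ_eq_map, ih, List.map_map, Function.comp_def]

lemma pf_sum_map_add (l : List Nat) (f g : Nat → Nat) :
    (l.map (fun x => f x + g x)).sum = (l.map f).sum + (l.map g).sum := by
  induction l with
  | nil => simp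
  | cons x t ih => simp [List.map_cons, List.sum_cons, ih]; ring

lemma pf_sum2_zero (R C : Nat) (f : Nat → Nat → Nat)
    (h0 : ∀ r c, r < R → c < C → f r c = 0) :
    ((List.range R).map (fun r => ((List.range C).map (f r)).sum)).sum = 0 := by
  apply pf_sum_map_range_zero
  intro r hr
  exact pf_sum_map_range_zero C (f r) (fun c hc => h0 r c hr hc)

lemma pf_sum2_single (R C r0 c0 : Nat) (f : Nat → Nat → Nat) (hr0 : r0 < R) (hc0 : c0 < C)
    (h0 : ∀ r c, r < R → c < C → ¬(r = r0 ∧ c = c0) → f r c = 0) :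
    ((List.range R).map (fun r => ((List.range C).map (f r)).sum)).sum = f r0 c0 := by
  rw [pf_sum_map_range_single R r0 _ hr0 (fun r hrR hne =>
    pf_sum_map_range_zero C (f r) (fun c hc => h0 r c hrR hc (fun hh => hne hh.1)))]
  exact pf_sum_map_range_single C c0 (f r0) hc0
    (fun c hc hne => h0 r0 c hr0 hc (fun hh => hne hh.2))

-- counting the horizontal bump targets at a fixed cell
lemma pf_count_opsH (si : List (Int × List Int)) (graph : List (List Int)) (n r c : Nat)
    (hr : r < n) (hc : c < n) :
    (pfOpsH si graph n).count (r * n + c)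
      = (if c + 1 < n ∧ pfLikes si graph r c r (c + 1) = true then 1 else 0)
        + (if 0 < c ∧ pfLikes si graph r c r (c - 1) = true then 1 else 0) := by
  have hn : 0 < n := by omega
  rw [pfOpsH, pf_count_flatMap]
  have hrow : ∀ r' : Nat, (((List.range (n - 1)).flatMap (fun c' =>
        (if pfLikes si graph r' c' r' (c' + 1) then [r' * n + c'] else [])
        ++ (if pfLikes si graph r' (c' + 1) r' c' then [r' * n + c' + 1] else []))).count (r * n + c))
      = ((List.range (n - 1)).map (fun c' =>
          if pfLikes si graph r' c' r' (c' + 1) = true ∧ r' * n + c' = r * n + c then 1 else 0)).sum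
        + ((List.range (n - 1)).map (fun c' =>
          if pfLikes si graph r' (c' + 1) r' c' = true ∧ r' * n + c' + 1 = r * n + c then 1 else 0)).sum := by
    intro r'
    rw [pf_count_flatMap, ← pf_sum_map_add]
    congr 1
    apply List.map_congr_left
    intro c' _
    rw [List.count_append, pf_count_single, pf_count_single]
  rw [List.map_congr_left (fun r' _ => hrow r'), pf_sum_map_add]
  congr 1
  · -- family H1: hit at (r, c) iff c+1 < n
    by_cases hcb : c + 1 < n
    · rw [pf_sum2_single n (n - 1) r c _ hr (by omega)
        (fun r' c' hr' hc' hne => by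
          rw [if_neg]
          rintro ⟨_, he⟩
          exact hne ((pf_enc_inj (show c' < n by omega) hc).1 he))]
      simp [hcb]
    · rw [pf_sum2_zero _ _ _ (fun r' c' hr' hc' => by
        rw [if_neg]
        rintro ⟨_, he⟩
        have := (pf_enc_inj (show c' < n by omega) hc).1 he
        omega)]
      rw [if_neg (by tauto)]
  · -- family H2: hit at (r, c-1) iff 0 < c
    by_cases h0c : 0 < c
    · rw [pf_sum2_single n (n - 1) r (c - 1) _ hr (by omega)
        (fun r' c' hr' hc' hne => by
          rw [if_neg]
          rintro ⟨_, he⟩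
          have he' : r' * n + (c' + 1) = r * n + c := by omega
          have h2 := (pf_enc_inj (show c' + 1 < n by omega) hc).1 he'
          exact hne ⟨h2.1, by omega⟩)]
      have hc1 : c - 1 + 1 = c := by omega
      rw [hc1]
      rw [if_congr (show (pfLikes si graph r c r (c - 1) = true ∧ r * n + (c - 1) + 1 = r * n + c)
        ↔ (0 < c ∧ pfLikes si graph r c r (c - 1) = true) from
        ⟨fun ⟨h, _⟩ => ⟨h0c, h⟩, fun ⟨_, h⟩ => ⟨h, by omega⟩⟩) rfl rfl]
    · rw [pf_sum2_zero _ _ _ (fun r' c' hr' hc' => by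
        rw [if_neg]
        rintro ⟨_, he⟩
        have he' : r' * n + (c' + 1) = r * n + c := by omega
        have h2 := (pf_enc_inj (show c' + 1 < n by omega) hc).1 he'
        omega)]
      rw [if_neg (by tauto)]

lemma pf_count_opsV (si : List (Int × List Int)) (graph : List (List Int)) (n r c : Nat)
    (hr : r < n) (hc : c < n) :
    (pfOpsV si graph n).count (r * n + c)
      = (if r + 1 < n ∧ pfLikes si graph r c (r + 1) c = true then 1 else 0)
        + (if 0 < r ∧ pfLikes si graph r c (r - 1) c = true then 1 else 0) := by
  have hn : 0 < n := by omega
  rw [pfOpsV, pf_count_flatMap]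
  have hrow : ∀ r' : Nat, (((List.range n).flatMap (fun c' =>
        (if pfLikes si graph r' c' (r' + 1) c' then [r' * n + c'] else [])
        ++ (if pfLikes si graph (r' + 1) c' r' c' then [(r' + 1) * n + c'] else []))).count (r * n + c))
      = ((List.range n).map (fun c' =>
          if pfLikes si graph r' c' (r' + 1) c' = true ∧ r' * n + c' = r * n + c then 1 else 0)).sum
        + ((List.range n).map (fun c' =>
          if pfLikes si graph (r' + 1) c' r' c' = true ∧ (r' + 1) * n + c' = r * n + c then 1 else 0)).sum := by
    intro r'
    rw [pf_count_flatMap, ← pf_sum_map_add]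
    congr 1
    apply List.map_congr_left
    intro c' _
    rw [List.count_append, pf_count_single, pf_count_single]
  rw [List.map_congr_left (fun r' _ => hrow r'), pf_sum_map_add]
  congr 1
  · -- family V1: hit at (r, c) iff r+1 < n
    by_cases hrb : r + 1 < n
    · rw [pf_sum2_single (n - 1) n r c _ (by omega) hc
        (fun r' c' hr' hc' hne => by
          rw [if_neg]
          rintro ⟨_, he⟩
          exact hne ((pf_enc_inj hc' hc).1 he))]
      simp [hrb]
    · rw [pf_sum2_zero _ _ _ (fun r' c' hr' hc' => by
        rw [if_neg]
        rintro ⟨_, he⟩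
        have := (pf_enc_inj hc' hc).1 he
        omega)]
      rw [if_neg (by tauto)]
  · -- family V2: hit at (r-1, c) iff 0 < r
    by_cases h0r : 0 < r
    · rw [pf_sum2_single (n - 1) n (r - 1) c _ (by omega) hc
        (fun r' c' hr' hc' hne => by
          rw [if_neg]
          rintro ⟨_, he⟩
          have h2 := (pf_enc_inj hc' hc).1 he
          exact hne ⟨by omega, h2.2⟩)]
      have hr1 : r - 1 + 1 = r := by omega
      rw [hr1]
      rw [if_congr (show (pfLikes si graph r c (r - 1) c = true ∧ r * n + c = r * n + c)
        ↔ (0 < r ∧ pfLikes si graph r c (r - 1) c = true) from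
        ⟨fun ⟨h, _⟩ => ⟨h0r, h⟩, fun ⟨_, h⟩ => ⟨h, rfl⟩⟩) rfl rfl]
    · rw [pf_sum2_zero _ _ _ (fun r' c' hr' hc' => by
        rw [if_neg]
        rintro ⟨_, he⟩
        have h2 := (pf_enc_inj hc' hc).1 he
        omega)]
      rw [if_neg (by tauto)]

lemma pf_hpass_eq (si : List (Int × List Int)) (graph : List (List Int)) (n : Nat)
    (cs : List Int) :
    (List.range n).foldl (fun cs r =>
      (List.range (n - 1)).foldl (fun cs c =>
        let a := pfCell graph r c
        let b := pfCell graph r (c + 1)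
        let cs1 := if (pfFav si a).contains b then pfBump cs (r * n + c) else cs
        if (pfFav si b).contains a then pfBump cs1 (r * n + c + 1) else cs1) cs) cs
      = (pfOpsH si graph n).foldl pfBump cs := by
  rw [pfOpsH, List.foldl_flatMap]
  refine PySem.List.foldl_congr_mem _ _ _ _ ?_
  intro acc r hr_
  rw [List.foldl_flatMap]
  refine PySem.List.foldl_congr_mem _ _ _ _ ?_
  intro acc2 c hc_
  show (let a := pfCell graph r c
        let b := pfCell graph r (c + 1)
        let cs1 := if (pfFav si a).contains b then pfBump acc2 (r * n + c) else acc2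
        if (pfFav si b).contains a then pfBump cs1 (r * n + c + 1) else cs1) = _
  cases h1 : pfLikes si graph r c r (c + 1) <;> cases h2 : pfLikes si graph r (c + 1) r c <;>
    simp_all [pfLikes]

lemma pf_vpass_eq (si : List (Int × List Int)) (graph : List (List Int)) (n : Nat)
    (cs : List Int) :
    (List.range (n - 1)).foldl (fun cs r =>
      (List.range n).foldl (fun cs c =>
        let a := pfCell graph r c
        let b := pfCell graph (r + 1) c
        let cs1 := if (pfFav si a).contains b then pfBump cs (r * n + c) else cs
        if (pfFav si b).contains a then pfBump cs1 ((r + 1) * n + c) else cs1) cs) cs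
      = (pfOpsV si graph n).foldl pfBump cs := by
  rw [pfOpsV, List.foldl_flatMap]
  refine PySem.List.foldl_congr_mem _ _ _ _ ?_
  intro acc r hr_
  rw [List.foldl_flatMap]
  refine PySem.List.foldl_congr_mem _ _ _ _ ?_
  intro acc2 c hc_
  show (let a := pfCell graph r c
        let b := pfCell graph (r + 1) c
        let cs1 := if (pfFav si a).contains b then pfBump acc2 (r * n + c) else acc2
        if (pfFav si b).contains a then pfBump cs1 ((r + 1) * n + c) else cs1) = _
  cases h1 : pfLikes si graph r c (r + 1) c <;> cases h2 : pfLikes si graph (r + 1) c r c <;>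
    simp_all [pfLikes]

-- B's two passes are the bump fold over the op lists
lemma pf_passes_eq (si : List (Int × List Int)) (graph : List (List Int)) (n : Nat)
    (cs : List Int) :
    (List.range (n - 1)).foldl (fun cs r =>
      (List.range n).foldl (fun cs c =>
        let a := pfCell graph r c
        let b := pfCell graph (r + 1) c
        let cs1 := if (pfFav si a).contains b then pfBump cs (r * n + c) else cs
        if (pfFav si b).contains a then pfBump cs1 ((r + 1) * n + c) else cs1) cs)
      ((List.range n).foldl (fun cs r =>
        (List.range (n - 1)).foldl (fun cs c =>
          let a := pfCell graph r c
          let b := pfCell graph r (c + 1)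
          let cs1 := if (pfFav si a).contains b then pfBump cs (r * n + c) else cs
          if (pfFav si b).contains a then pfBump cs1 (r * n + c + 1) else cs1) cs) cs)
      = (pfOpsH si graph n ++ pfOpsV si graph n).foldl pfBump cs := by
  rw [List.foldl_append, pf_hpass_eq, pf_vpass_eq]

-- all bump targets are inside the table
lemma pf_ops_lt (si : List (Int × List Int)) (graph : List (List Int)) (n : Nat) :
    ∀ i ∈ pfOpsH si graph n ++ pfOpsV si graph n, i < n * n := by
  intro i hi
  rcases List.mem_append.1 hi with h | h
  · simp only [pfOpsH, List.mem_flatMap, List.mem_range, List.mem_append] at h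
    obtain ⟨r, hr, c, hc, hm | hm⟩ := h
    · split at hm
      · simp at hm; subst hm; exact pf_enc_lt hr (by omega)
      · simp at hm
    · split at hm
      · simp at hm; subst hm
        have := pf_enc_lt (n := n) hr (show c + 1 < n by omega)
        linarith
      · simp at hm
  · simp only [pfOpsV, List.mem_flatMap, List.mem_range, List.mem_append] at h
    obtain ⟨r, hr, c, hc, hm | hm⟩ := h
    · split at hm
      · simp at hm; subst hm; exact pf_enc_lt (by omega) hc
      · simp at hm
    · split at hm
      · simp at hm; subst hm; exact pf_enc_lt (show r + 1 < n by omega) hc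
      · simp at hm

lemma pf_cellI_natCast (graph : List (List Int)) (r c : Nat) :
    pfCellI graph (r : Int) (c : Int) = pfCell graph r c := by
  simp [pfCellI, pfCell]

lemma pf_step (C : Prop) [Decidable C] (b : Bool) (p : Int) :
    (if C then (if b = true then p + 1 else p) else p)
      = p + (if C ∧ b = true then (1 : Int) else 0) := by
  split_ifs <;> simp_all

lemma pf_ind_congr {C1 C2 : Prop} [Decidable C1] [Decidable C2] {b1 b2 : Bool}
    (hc : C1 ↔ C2) (hb : C2 → b1 = b2) :
    (if C1 ∧ b1 = true then (1 : Int) else 0) = (if C2 ∧ b2 = true then (1 : Int) else 0) := by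
  by_cases h : C2
  · rw [hb h]; exact if_congr (and_congr hc Iff.rfl) rfl rfl
  · rw [if_neg (fun hh => h (hc.1 hh.1)), if_neg (fun hh => h hh.1)]

-- A's inner 4-direction loop computes pfCnt
lemma pf_A_inner (si : List (Int × List Int)) (graph : List (List Int)) (r c : Nat)
    (hr : r < graph.length) (hc : c < graph.length) :
    (List.range 4).foldl (fun point i =>
        let moved_x : Int := (r : Int) + pfDx.getD i 0
        let moved_y : Int := (c : Int) + pfDy.getD i 0
        if 0 ≤ moved_x ∧ moved_x < (graph.length : Int) ∧ 0 ≤ moved_y ∧ moved_y < (graph.length : Int) then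
          if (pfFav si (pfCell graph r c)).contains (pfCellI graph moved_x moved_y) then point + 1 else point
        else point) (0 : Int)
      = (pfCnt si graph graph.length r c : Int) := by
  have h4 : List.range 4 = [0, 1, 2, 3] := rfl
  rw [h4]
  simp only [List.foldl_cons, List.foldl_nil, pfDx, pfDy,
    List.getD_cons_zero, List.getD_cons_succ]
  rw [pf_step, pf_step, pf_step, pf_step]
  have E1 : (if (0 ≤ (r:Int) + 1 ∧ (r:Int) + 1 < (graph.length:Int) ∧ 0 ≤ (c:Int) + 0 ∧ (c:Int) + 0 < (graph.length:Int)) ∧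
      (pfFav si (pfCell graph r c)).contains (pfCellI graph ((r:Int) + 1) ((c:Int) + 0)) = true then (1:Int) else 0)
      = (if r + 1 < graph.length ∧ pfLikes si graph r c (r + 1) c = true then (1:Int) else 0) := by
    refine pf_ind_congr (by omega) (fun h => ?_)
    have hx : ((r : Int) + 1) = ((r + 1 : Nat) : Int) := by omega
    have hy : ((c : Int) + 0) = ((c : Nat) : Int) := by omega
    rw [hx, hy, pf_cellI_natCast, pfLikes]
  have E2 : (if (0 ≤ (r:Int) + -1 ∧ (r:Int) + -1 < (graph.length:Int) ∧ 0 ≤ (c:Int) + 0 ∧ (c:Int) + 0 < (graph.length:Int)) ∧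
      (pfFav si (pfCell graph r c)).contains (pfCellI graph ((r:Int) + -1) ((c:Int) + 0)) = true then (1:Int) else 0)
      = (if 0 < r ∧ pfLikes si graph r c (r - 1) c = true then (1:Int) else 0) := by
    refine pf_ind_congr (by omega) (fun h => ?_)
    have hx : ((r : Int) + -1) = ((r - 1 : Nat) : Int) := by omega
    have hy : ((c : Int) + 0) = ((c : Nat) : Int) := by omega
    rw [hx, hy, pf_cellI_natCast, pfLikes]
  have E3 : (if (0 ≤ (r:Int) + 0 ∧ (r:Int) + 0 < (graph.length:Int) ∧ 0 ≤ (c:Int) + 1 ∧ (c:Int) + 1 < (graph.length:Int)) ∧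
      (pfFav si (pfCell graph r c)).contains (pfCellI graph ((r:Int) + 0) ((c:Int) + 1)) = true then (1:Int) else 0)
      = (if c + 1 < graph.length ∧ pfLikes si graph r c r (c + 1) = true then (1:Int) else 0) := by
    refine pf_ind_congr (by omega) (fun h => ?_)
    have hx : ((r : Int) + 0) = ((r : Nat) : Int) := by omega
    have hy : ((c : Int) + 1) = ((c + 1 : Nat) : Int) := by omega
    rw [hx, hy, pf_cellI_natCast, pfLikes]
  have E4 : (if (0 ≤ (r:Int) + 0 ∧ (r:Int) + 0 < (graph.length:Int) ∧ 0 ≤ (c:Int) + -1 ∧ (c:Int) + -1 < (graph.length:Int)) ∧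
      (pfFav si (pfCell graph r c)).contains (pfCellI graph ((r:Int) + 0) ((c:Int) + -1)) = true then (1:Int) else 0)
      = (if 0 < c ∧ pfLikes si graph r c r (c - 1) = true then (1:Int) else 0) := by
    refine pf_ind_congr (by omega) (fun h => ?_)
    have hx : ((r : Int) + 0) = ((r : Nat) : Int) := by omega
    have hy : ((c : Int) + -1) = ((c - 1 : Nat) : Int) := by omega
    rw [hx, hy, pf_cellI_natCast, pfLikes]
  rw [E1, E2, E3, E4, pfCnt]
  push_cast
  ring

-- ===== VERDICT (by name: the statement is the Claim_ definition above) =====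
theorem point_function_spec : Claim_equal_point_function := by
  intro si graph _ _
  unfold Spec_point_function
  have hG : ∀ r c : Nat, r < graph.length → c < graph.length →
      (pfPointsDict.lookup ((List.range 4).foldl (fun point i =>
          let moved_x : Int := (r : Int) + pfDx.getD i 0
          let moved_y : Int := (c : Int) + pfDy.getD i 0
          if 0 ≤ moved_x ∧ moved_x < (graph.length : Int) ∧ 0 ≤ moved_y ∧ moved_y < (graph.length : Int) then
            if (pfFav si (pfCell graph r c)).contains (pfCellI graph moved_x moved_y) then point + 1 else point
          else point) 0)).getD 0
      = PySem.List.pyGetD pfPoints ((pfCnt si graph graph.length r c : Nat) : Int) 0 := by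
    intro r c hr hc
    rw [pf_A_inner si graph r c hr hc, pf_pts_eq _ (pfCnt_le_four si graph graph.length r c)]
  have hA : point_function si graph
      = ((List.range graph.length).map (fun r => ((List.range graph.length).map (fun c =>
          PySem.List.pyGetD pfPoints ((pfCnt si graph graph.length r c : Nat) : Int) 0)).sum)).sum := by
    simp only [point_function]
    have h1 : ∀ (acc : Int), ∀ r ∈ List.range graph.length,
        (List.range graph.length).foldl (fun total_point col_idx =>
          let favorites := pfFav si (pfCell graph r col_idx)
          let point : Int :=
            (List.range 4).foldl (fun point i =>
              let moved_x : Int := (r : Int) + pfDx.getD i 0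
              let moved_y : Int := (col_idx : Int) + pfDy.getD i 0
              if 0 ≤ moved_x ∧ moved_x < (graph.length : Int) ∧ 0 ≤ moved_y ∧ moved_y < (graph.length : Int) then
                if favorites.contains (pfCellI graph moved_x moved_y) then point + 1 else point
              else point) 0
          total_point + (pfPointsDict.lookup point).getD 0) acc
        = acc + ((List.range graph.length).map (fun c =>
            PySem.List.pyGetD pfPoints ((pfCnt si graph graph.length r c : Nat) : Int) 0)).sum := by
      intro acc r hrm
      rw [PySem.List.foldl_add]
      congr 1
      refine congrArg List.sum (List.map_congr_left ?_)
      intro c hcm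
      exact hG r c (List.mem_range.1 hrm) (List.mem_range.1 hcm)
    rw [PySem.List.foldl_congr_mem _ _ _ _ h1, PySem.List.foldl_add]
    simp
  have hbounds : ∀ i ∈ pfOpsH si graph graph.length ++ pfOpsV si graph graph.length,
      i < (List.replicate (graph.length * graph.length) (0 : Int)).length := by
    simpa using pf_ops_lt si graph graph.length
  have hB : point_function_alt si graph
      = ((List.range graph.length).map (fun r => ((List.range graph.length).map (fun c =>
          PySem.List.pyGetD pfPoints ((pfCnt si graph graph.length r c : Nat) : Int) 0)).sum)).sum := by
    simp only [point_function_alt]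
    rw [pf_passes_eq, PySem.List.foldl_add, pf_map_eq_map_range, pf_foldl_bump_length,
        List.length_replicate, pf_sum_range_mul]
    rw [zero_add]
    refine congrArg List.sum (List.map_congr_left ?_)
    intro r hrm
    refine congrArg List.sum (List.map_congr_left ?_)
    intro c hcm
    have hr := List.mem_range.1 hrm
    have hc := List.mem_range.1 hcm
    rw [pf_foldl_bump_getD _ _ hbounds (r * graph.length + c)]
    rw [List.count_append, pf_count_opsH si graph graph.length r c hr hc,
        pf_count_opsV si graph graph.length r c hr hc]
    have hrep : (List.replicate (graph.length * graph.length) (0 : Int)).getD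
        (r * graph.length + c) 0 = 0 := by
      simp
    rw [hrep]
    congr 1
    rw [pfCnt]
    push_cast
    ring
  exact hA.trans hB.symm
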